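-- pv_equiv track=rewrite | github.com/Harman1010/Voice-Based-Shopping-Assistant | nlp_engine.py | extract_item
-- ===== SOURCE A (Python) =====
-- WORD_NUM = {
--     "one": 1, "two": 2, "three": 3,
--     "four": 4, "five": 5, "six": 6
-- }
--
-- def extract_item(text):
--     text = text.lower()
--
--     import string
--     text = text.translate(str.maketrans('', '', string.punctuation))
--
--     words = text.split()
--
--
--     verbs = ["add", "remove", "modify", "find", "buy"]
--
--     words = [w for w in words if w not in verbs]
--
--
--     words = [w for w in words if not w.isdigit() and w not in WORD_NUM]
--
--
--     stop_words = ["to", "from", "under", "in", "on"]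
--
--     item_words = []
--     for w in words:
--         if w in stop_words:
--             break
--         item_words.append(w)
--
--     return " ".join(item_words).strip()
-- ===== SOURCE B (Python) =====
-- import string
--
-- _PUNCT = string.punctuation
-- _SKIP = ("add", "remove", "modify", "find", "buy",
--          "one", "two", "three", "four", "five", "six")
-- _STOP = ("to", "from", "under", "in", "on")
--
--
-- def _scan(chars):
--     # streaming tokenizer: build words char by char, decide each word on the fly
--     out = []
--     buf = []
--     for ch in chars:
--         if ch in _PUNCT:
--             continue
--         if ch.isspace():
--             if buf:
--                 w = "".join(buf)
--                 buf = []
--                 if w in _STOP: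
--                     return " ".join(out)
--                 if w not in _SKIP and not w.isdigit():
--                     out.append(w)
--         else:
--             buf.append(ch)
--     return " ".join(out)
--
--
-- def extract_item(text):
--     return _scan(text.lower() + " ").strip()
-- ===== Notes on version B (the rewrite author's own statement) =====
-- stated objective: alternative
-- what changed: B replaces A's multi-pass list pipeline (translate-delete punctuation, split into a word list, two filtering comprehensions, then a break loop) with a single character-level streaming tokenizer: one state machine over the characters that drops punctuation, builds each word in a buffer, and classifies it (skip/stop/keep) the moment a whitespace boundary closes it, never materialising the intermediate word lists.
import Mathlib
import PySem

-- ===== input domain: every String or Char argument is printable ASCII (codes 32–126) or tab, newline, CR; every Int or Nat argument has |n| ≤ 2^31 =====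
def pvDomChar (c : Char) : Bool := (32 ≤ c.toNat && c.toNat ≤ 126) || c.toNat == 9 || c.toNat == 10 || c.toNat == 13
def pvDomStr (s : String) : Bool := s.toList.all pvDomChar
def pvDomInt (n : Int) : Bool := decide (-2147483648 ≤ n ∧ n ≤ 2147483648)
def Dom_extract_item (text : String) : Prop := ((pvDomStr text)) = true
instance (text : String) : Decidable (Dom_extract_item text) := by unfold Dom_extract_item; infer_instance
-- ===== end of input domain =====

-- B replaces A's multi-pass word-list pipeline by a single character-level streaming
-- tokenizer (alternative decomposition, same asymptotic cost).

-- string.punctuation (module constant shared by both programs)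
def pvPunct : List Char := ['!', '"', '#', '$', '%', '&', '\'', '(', ')', '*', '+', ',', '-', '.', '/', ':', ';', '<', '=', '>', '?', '@', '[', '\\', ']', '^', '_', '`', '{', '|', '}', '~']

-- keys of WORD_NUM ('w in WORD_NUM' tests key membership; the values are never read)
def pvWordNumKeys : List String := ["one", "two", "three", "four", "five", "six"]

def pvVerbs : List String := ["add", "remove", "modify", "find", "buy"]
def pvStops : List String := ["to", "from", "under", "in", "on"]

-- ===== PORT A =====
-- A's final loop: append words until the first stop word (break)
def pvLoopA : List String → List String
  | [] => []
  | w :: ws => if pvStops.contains w then [] else w :: pvLoopA ws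

def extract_item (text : String) : String :=
  let t := PySem.Str.lower text
  -- text.translate(str.maketrans('', '', string.punctuation)) deletes exactly the
  -- punctuation characters (exact: the table only deletes, maps nothing)
  let t2 := String.ofList (t.toList.filter (fun c => !pvPunct.contains c))
  let words := PySem.Str.split₀ t2
  let words1 := words.filter (fun w => !pvVerbs.contains w)
  let words2 := words1.filter (fun w => !PySem.Str.strIsdigit w && !pvWordNumKeys.contains w)
  PySem.Str.strip (PySem.Str.join " " (pvLoopA words2))

-- ===== PORT B =====
-- B's skip set: verbs and number-word keys together
def pvSkip : List String := ["add", "remove", "modify", "find", "buy",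
                             "one", "two", "three", "four", "five", "six"]

-- B's _scan loop: one pass over the characters, word buffer flushed at whitespace
def pvScanGo : List Char → List String → List Char → String
  | [], out, _buf => PySem.Str.join " " out
  | c :: cs, out, buf =>
    if pvPunct.contains c then pvScanGo cs out buf
    else if PySem.Chars.isspace c then
      (if buf.isEmpty then pvScanGo cs out buf
       else
         let w := String.ofList buf
         if pvStops.contains w then PySem.Str.join " " out
         else if !pvSkip.contains w && !PySem.Str.strIsdigit w then pvScanGo cs (out ++ [w]) []
         else pvScanGo cs out [])
    else pvScanGo cs out (buf ++ [c])

def extract_item_alt (text : String) : String :=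
  -- _scan(text.lower() + " ").strip()
  PySem.Str.strip (pvScanGo ((PySem.Str.lower text).toList ++ [' ']) [] [])

-- ===== PRECONDITION & SPEC =====
def Spec_extract_item (text : String) (out : String) : Prop := out = extract_item_alt text
instance (text : String) (out : String) : Decidable (Spec_extract_item text out) := by unfold Spec_extract_item; infer_instance

-- ===== CLAIM (what is proved, stated in full; the proofs are below) =====
def Claim_equal_extract_item : Prop := ∀ (text : String), Dom_extract_item text → Spec_extract_item text (extract_item text)

-- ===== LEMMAS AND PROOFS =====

-- tokenizer of Python's str.split(): current (in-order) buffer, remaining chars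
def pvTok : List Char → List Char → List (List Char)
  | buf, [] => if buf = [] then [] else [buf]
  | buf, c :: cs =>
    if PySem.Chars.isspace c then
      (if buf = [] then pvTok [] cs else buf :: pvTok [] cs)
    else pvTok (buf ++ [c]) cs

-- split₀.go's reversed-accumulator recursion computes pvTok
theorem pv_split_go_eq (cs : List Char) : ∀ (cur : List Char) (acc : List (List Char)),
    PySem.Chars.split₀.go cs cur acc = acc.reverse ++ pvTok cur.reverse cs := by
  induction cs with
  | nil =>
    intro cur acc
    by_cases h : cur = []
    · simp [PySem.Chars.split₀.go, pvTok, h]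
    · simp [PySem.Chars.split₀.go, pvTok, h, List.isEmpty_iff]
  | cons c cs ih =>
    intro cur acc
    by_cases hs : PySem.Chars.isspace c = true
    · by_cases h : cur = []
      · simp [PySem.Chars.split₀.go, pvTok, hs, h, ih]
      · simp [PySem.Chars.split₀.go, pvTok, hs, h, List.isEmpty_iff, ih]
    · simp [PySem.Chars.split₀.go, pvTok, hs, ih, List.reverse_cons]

theorem pv_split₀_eq_tok (cs : List Char) :
    PySem.Chars.split₀ cs = pvTok [] cs := by
  simpa using pv_split_go_eq cs [] []

-- B's per-word decision applied to a ready-made word list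
def pvFusedB : List String → List String
  | [] => []
  | w :: ws =>
    if pvStops.contains w then []
    else if !pvSkip.contains w && !PySem.Str.strIsdigit w then w :: pvFusedB ws
    else pvFusedB ws

-- A's break loop over the twice-filtered list is B's per-word decision
theorem pv_pipeline_eq_fused (ws : List String) :
    pvLoopA ((ws.filter (fun w => !pvVerbs.contains w)).filter
      (fun w => !PySem.Str.strIsdigit w && !pvWordNumKeys.contains w)) = pvFusedB ws := by
  induction ws with
  | nil => rfl
  | cons w ws ih =>
    by_cases hst : w ∈ pvStops
    · have hv : w ∉ pvVerbs := by fin_cases hst <;> decide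
      have hd : PySem.Chars.strIsdigit w.toList = false := by fin_cases hst <;> decide
      have hn : w ∉ pvWordNumKeys := by fin_cases hst <;> decide
      simp [pvLoopA, pvFusedB, hst, hv, hd, hn]
    · by_cases hv : w ∈ pvVerbs
      · have hsk : w ∈ pvSkip := by fin_cases hv <;> decide
        simp [pvFusedB, hst, hv, hsk] at ih ⊢
        exact ih
      · by_cases hd : PySem.Chars.strIsdigit w.toList = true
        · simp [pvFusedB, hst, hv, hd] at ih ⊢
          exact ih
        · by_cases hn : w ∈ pvWordNumKeys
          · have hsk : w ∈ pvSkip := by fin_cases hn <;> decide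
            simp [pvFusedB, hst, hv, hd, hn, hsk] at ih ⊢
            exact ih
          · have hsk : w ∉ pvSkip := by
              intro h
              fin_cases h <;> simp_all [pvVerbs, pvWordNumKeys]
            simp [pvLoopA, pvFusedB, hst, hv, hd, hn, hsk] at ih ⊢
            exact ih

-- the scanner with the punctuation branch removed (proof-side helper)
def pvScanNP : List Char → List String → List Char → String
  | [], out, _buf => PySem.Str.join " " out
  | c :: cs, out, buf =>
    if PySem.Chars.isspace c then
      (if buf.isEmpty then pvScanNP cs out buf
       else
         let w := String.ofList buf
         if pvStops.contains w then PySem.Str.join " " out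
         else if !pvSkip.contains w && !PySem.Str.strIsdigit w then pvScanNP cs (out ++ [w]) []
         else pvScanNP cs out [])
    else pvScanNP cs out (buf ++ [c])

theorem pv_punct_not_space : ∀ c ∈ pvPunct, PySem.Chars.isspace c = false := by
  intro c hc; fin_cases hc <;> decide

-- dropping punctuation inline = filtering it out first
theorem pv_scan_eq_scanNP (cs : List Char) : ∀ (out : List String) (buf : List Char),
    pvScanGo cs out buf = pvScanNP (cs.filter (fun c => !pvPunct.contains c)) out buf := by
  induction cs with
  | nil => intro out buf; rfl
  | cons c cs ih =>
    intro out buf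
    by_cases hp : c ∈ pvPunct
    · have hs := pv_punct_not_space c hp
      simp [pvScanGo, hp, ih]
    · by_cases hs : PySem.Chars.isspace c = true
      · by_cases hb : buf.isEmpty
        · simp [pvScanGo, pvScanNP, hp, hs, hb, ih]
        · simp [pvScanGo, pvScanNP, hp, hs, hb, ih]
      · simp [pvScanGo, pvScanNP, hp, hs, ih]

-- the scanner on cs + sentinel space computes B's decision over the tokens of cs
theorem pv_space_true : PySem.Chars.isspace ' ' = true := by decide

theorem pv_scanNP_spec (cs : List Char) : ∀ (out : List String) (buf : List Char),
    pvScanNP (cs ++ [' ']) out buf =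
      PySem.Str.join " " (out ++ pvFusedB ((pvTok buf cs).map String.ofList)) := by
  induction cs with
  | nil =>
    intro out buf
    by_cases hb : buf = []
    · simp [pvScanNP, pvTok, pvFusedB, hb, pv_space_true]
    · by_cases hst : String.ofList buf ∈ pvStops
      · simp [pvScanNP, pvTok, pvFusedB, hb, hst, pv_space_true, List.isEmpty_iff]
      · by_cases hk : String.ofList buf ∉ pvSkip ∧ PySem.Chars.strIsdigit buf = false
        · simp [pvScanNP, pvTok, pvFusedB, hb, hst, hk, pv_space_true, List.isEmpty_iff]
        · simp [pvScanNP, pvTok, pvFusedB, hb, hst, hk, pv_space_true, List.isEmpty_iff]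
  | cons c cs ih =>
    intro out buf
    by_cases hs : PySem.Chars.isspace c = true
    · by_cases hb : buf = []
      · simp [pvScanNP, pvTok, hs, hb, ih]
      · by_cases hst : String.ofList buf ∈ pvStops
        · simp [pvScanNP, pvTok, pvFusedB, hs, hb, hst, List.isEmpty_iff]
        · by_cases hk : String.ofList buf ∉ pvSkip ∧ PySem.Chars.strIsdigit buf = false
          · simp [pvScanNP, pvTok, pvFusedB, hs, hb, hst, hk, List.isEmpty_iff, ih]
          · simp [pvScanNP, pvTok, pvFusedB, hs, hb, hst, hk, List.isEmpty_iff, ih]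
    · simp [pvScanNP, pvTok, hs, ih]

-- ===== VERDICT (by name: the statement is the Claim_ definition above) =====
theorem extract_item_spec : Claim_equal_extract_item := by
  intro text _
  unfold Spec_extract_item extract_item extract_item_alt
  rw [pv_scan_eq_scanNP, List.filter_append]
  rw [show List.filter (fun c => !pvPunct.contains c) [' '] = [' '] from by decide]
  rw [pv_scanNP_spec]
  simp only [PySem.Str.split₀, String.toList_ofList, pv_split₀_eq_tok, List.nil_append]
  rw [← pv_pipeline_eq_fused]
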